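-- pv_equiv track=rewrite | github.com/iamanujup/nikuni | main.py | filter_quizzes_by_search
-- ===== SOURCE A (Python) =====
-- def filter_quizzes_by_search(quizzes, search_terms):
--     """Filter quizzes by search terms in quiz name"""
--     if not search_terms:
--         return quizzes
--
--     filtered_quizzes = []
--     search_terms_lower = [term.lower() for term in search_terms]
--
--     for quiz in quizzes:
--         quiz_name = quiz.get('quiz_name', '').lower()
--
--
--         if all(term in quiz_name for term in search_terms_lower):
--             filtered_quizzes.append(quiz)
--
--     return filtered_quizzes
-- ===== SOURCE B (Python) =====
-- def filter_quizzes_by_search(quizzes, search_terms):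
--     """Filter quizzes by search terms in quiz name (index-set narrowing)."""
--     names = [quiz.get('quiz_name', '').lower() for quiz in quizzes]
--     keep = list(range(len(quizzes)))
--     for term in search_terms:
--         t = term.lower()
--         keep = [i for i in keep if t in names[i]]
--     return [quizzes[i] for i in keep]
-- ===== Notes on version B (the rewrite author's own statement) =====
-- stated objective: alternative
-- what changed: B precomputes all lowered names once, narrows a list of surviving indices one term at a time, and gathers the surviving quizzes by index at the end, instead of A's single pass over quizzes with an inner all() over the terms.
import Mathlib
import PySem

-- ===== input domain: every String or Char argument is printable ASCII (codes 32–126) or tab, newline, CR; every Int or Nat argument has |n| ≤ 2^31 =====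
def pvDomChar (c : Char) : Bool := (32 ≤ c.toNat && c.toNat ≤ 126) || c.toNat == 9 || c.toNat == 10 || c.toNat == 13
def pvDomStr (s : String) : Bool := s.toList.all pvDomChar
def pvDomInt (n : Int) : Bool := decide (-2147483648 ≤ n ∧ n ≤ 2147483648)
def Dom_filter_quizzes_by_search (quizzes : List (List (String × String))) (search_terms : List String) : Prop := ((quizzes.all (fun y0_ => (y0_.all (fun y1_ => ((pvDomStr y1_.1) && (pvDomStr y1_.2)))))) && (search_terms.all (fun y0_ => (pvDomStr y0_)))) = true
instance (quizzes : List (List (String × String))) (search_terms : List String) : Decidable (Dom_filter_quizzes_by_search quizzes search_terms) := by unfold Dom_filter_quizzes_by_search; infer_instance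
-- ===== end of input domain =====

-- B precomputes the lowered names once, narrows a list of surviving INDICES one term
-- at a time, and gathers the surviving quizzes by index at the end — a different
-- decomposition from A's single pass over quizzes with an inner all() over terms.

-- ===== PORT A =====
def filter_quizzes_by_search (quizzes : List (List (String × String))) (search_terms : List String) : List (List (String × String)) :=
  if search_terms = [] then quizzes
  else
    let search_terms_lower := search_terms.map PySem.Str.lower
    quizzes.foldl (fun filtered_quizzes quiz =>
      let quiz_name := PySem.Str.lower ((PySem.Dict.mk quiz).getD "quiz_name" "")
      if search_terms_lower.all (fun term => PySem.Str.isIn term quiz_name) then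
        filtered_quizzes ++ [quiz]
      else filtered_quizzes) []

-- ===== PORT B =====
def filter_quizzes_by_search_alt (quizzes : List (List (String × String))) (search_terms : List String) : List (List (String × String)) :=
  let names := quizzes.map (fun quiz => PySem.Str.lower ((PySem.Dict.mk quiz).getD "quiz_name" ""))
  let keep := search_terms.foldl (fun keep term =>
      let t := PySem.Str.lower term
      keep.filter (fun i => PySem.Str.isIn t (names.getD i "")))
    (List.range quizzes.length)
  keep.map (fun i => quizzes.getD i [])

-- ===== PRECONDITION & SPEC =====
def Spec_filter_quizzes_by_search (quizzes : List (List (String × String))) (search_terms : List String) (out : List (List (String × String))) : Prop := out = filter_quizzes_by_search_alt quizzes search_terms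
instance (quizzes : List (List (String × String))) (search_terms : List String) (out : List (List (String × String))) : Decidable (Spec_filter_quizzes_by_search quizzes search_terms out) := by unfold Spec_filter_quizzes_by_search; infer_instance

-- ===== CLAIM (what is proved, stated in full; the proofs are below) =====
def Claim_equal_filter_quizzes_by_search : Prop := ∀ (quizzes : List (List (String × String))) (search_terms : List String), Dom_filter_quizzes_by_search quizzes search_terms → Spec_filter_quizzes_by_search quizzes search_terms (filter_quizzes_by_search quizzes search_terms)

-- ===== LEMMAS AND PROOFS =====

-- successive narrowing over the terms equals one filter with the conjunction of all tests
theorem foldl_filter_eq_filter_all {α β : Type} (g : α → β → Bool) :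
    ∀ (ts : List β) (qs : List α),
      ts.foldl (fun acc t => acc.filter (fun q => g q t)) qs
        = qs.filter (fun q => ts.all (g q)) := by
  intro ts
  induction ts with
  | nil => intro qs; simp
  | cons t ts ih =>
    intro qs
    simp only [List.foldl_cons, ih, List.filter_filter, List.all_cons]
    exact List.filter_congr (fun q _ => by rw [Bool.and_comm])

-- filtering index positions by a test on f of the element, then gathering by index,
-- equals filtering the list itself
theorem gather_filter_range {α β : Type} (f : α → β) (p : β → Bool) (d : α) (d' : β) :
    ∀ (qs : List α),
      (((List.range qs.length).filter (fun i => p ((qs.map f).getD i d'))).map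
        (fun i => qs.getD i d)) = qs.filter (fun q => p (f q)) := by
  intro qs
  induction qs with
  | nil => simp
  | cons q qs ih =>
    simp only [List.length_cons, List.range_succ_eq_map, List.filter_cons, List.map_cons,
      List.getD_cons_zero, List.filter_map, Function.comp_def, List.getD_cons_succ]
    simp only [List.getD, List.getElem?_map] at ih
    by_cases hp : p (f q) <;> simpa [hp, List.getD, Function.comp_def] using ih

-- ===== VERDICT (by name: the statement is the Claim_ definition above) =====
theorem filter_quizzes_by_search_spec : Claim_equal_filter_quizzes_by_search := by
  intro quizzes search_terms _
  unfold Spec_filter_quizzes_by_search filter_quizzes_by_search filter_quizzes_by_search_alt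
  dsimp only
  rw [foldl_filter_eq_filter_all
    (fun i term => PySem.Str.isIn (PySem.Str.lower term)
      ((quizzes.map (fun quiz =>
        PySem.Str.lower ((PySem.Dict.mk quiz).getD "quiz_name" ""))).getD i ""))]
  rw [gather_filter_range
    (fun quiz => PySem.Str.lower ((PySem.Dict.mk quiz).getD "quiz_name" ""))
    (fun nm => search_terms.all (fun term => PySem.Str.isIn (PySem.Str.lower term) nm)) [] ""]
  by_cases h : search_terms = []
  · simp [h]
  · simp only [h, if_false]
    rw [PySem.List.foldl_append_if_eq_filter]
    simp [List.all_map, Function.comp_def]
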